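-- pv_equiv track=rewrite | github.com/BrooksLabUCSC/flair | src/flair/flair_transcriptome.py | group_reads_by_ends
-- ===== SOURCE A (Python) =====
-- def group_reads_by_ends(read_info_list, sort_index, end_window):
--     sorted_ends = sorted(read_info_list, key=lambda x: x[sort_index])
--     new_groups, group = [], []
--     last_edge = 0
--     for iso_info in sorted_ends:
--         edge = iso_info[sort_index]
--         if edge - last_edge <= end_window:
--             group.append(iso_info)
--         else:
--             if len(group) > 0:
--                 new_groups.append(group)
--             group = [iso_info]
--         last_edge = edge
--     if len(group) > 0:
--         new_groups.append(group)
--     return new_groups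
-- ===== SOURCE B (Python) =====
-- def group_reads_by_ends(read_info_list, sort_index, end_window):
--     rest = sorted(read_info_list, key=lambda x: x[sort_index])
--     groups = []
--     while rest:
--         group = [rest[0]]
--         rest = rest[1:]
--         while rest and rest[0][sort_index] - group[-1][sort_index] <= end_window:
--             group.append(rest[0])
--             rest = rest[1:]
--         groups.append(group)
--     return groups
-- ===== Notes on version B (the rewrite author's own statement) =====
-- stated objective: alternative
-- what changed: Replaced A's single fold with (groups, current-group, last-edge) accumulator state and a final flush by a two-level greedy scan: repeatedly take the next read and consume the maximal run of following reads whose end stays within end_window of the previous one, emitting each complete group immediately.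
import Mathlib
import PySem

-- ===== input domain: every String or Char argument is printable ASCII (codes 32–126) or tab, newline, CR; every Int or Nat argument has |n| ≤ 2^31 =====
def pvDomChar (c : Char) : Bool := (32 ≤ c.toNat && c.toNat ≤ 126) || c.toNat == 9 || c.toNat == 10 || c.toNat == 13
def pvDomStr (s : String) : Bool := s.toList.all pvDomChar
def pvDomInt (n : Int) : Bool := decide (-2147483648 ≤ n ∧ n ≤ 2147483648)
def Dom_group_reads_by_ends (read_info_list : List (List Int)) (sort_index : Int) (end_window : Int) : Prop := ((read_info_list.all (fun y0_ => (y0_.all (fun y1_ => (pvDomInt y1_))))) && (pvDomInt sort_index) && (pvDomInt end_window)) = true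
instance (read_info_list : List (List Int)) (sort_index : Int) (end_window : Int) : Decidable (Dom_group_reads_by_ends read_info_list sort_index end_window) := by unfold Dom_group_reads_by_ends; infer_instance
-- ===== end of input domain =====

-- ===== PORT A =====
-- B restructures A's flush-on-break fold into a greedy two-level scan (objective: alternative decomposition, same cost).
-- A-side: literal transliteration of the sort + single fold with state (new_groups, group, last_edge) and final flush.
def group_reads_by_ends (read_info_list : List (List Int)) (sort_index : Int) (end_window : Int) : List (List (List Int)) :=
  let sorted_ends := PySem.List.sorted read_info_list (fun x => PySem.List.pyGetD x sort_index 0) false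
  let st := sorted_ends.foldl
    (fun (st : List (List (List Int)) × List (List Int) × Int) iso_info =>
      let edge := PySem.List.pyGetD iso_info sort_index 0
      if edge - st.2.2 ≤ end_window then
        (st.1, st.2.1 ++ [iso_info], edge)
      else
        ((if st.2.1.length > 0 then st.1 ++ [st.2.1] else st.1), [iso_info], edge))
    ([], [], 0)
  if st.2.1.length > 0 then st.1 ++ [st.2.1] else st.1

-- ===== PORT B =====
-- inner while loop of Source B: consume the run of reads within end_window of the previous edge
def pvTakeGroup (sort_index end_window prev : Int) : List (List Int) → List (List Int) × List (List Int)
  | [] => ([], [])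
  | y :: ys =>
    if PySem.List.pyGetD y sort_index 0 - prev ≤ end_window then
      let p := pvTakeGroup sort_index end_window (PySem.List.pyGetD y sort_index 0) ys
      (y :: p.1, p.2)
    else ([], y :: ys)

theorem pvTakeGroup_snd_len (sort_index end_window prev : Int) (l : List (List Int)) :
    (pvTakeGroup sort_index end_window prev l).2.length ≤ l.length := by
  induction l generalizing prev with
  | nil => simp [pvTakeGroup]
  | cons y ys ih =>
    simp only [pvTakeGroup]
    split
    · exact le_trans (ih _) (Nat.le_succ _)
    · simp

-- outer while loop of Source B
def pvBuildGroups (sort_index end_window : Int) : List (List Int) → List (List (List Int))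
  | [] => []
  | x :: rest =>
    (x :: (pvTakeGroup sort_index end_window (PySem.List.pyGetD x sort_index 0) rest).1) ::
      pvBuildGroups sort_index end_window (pvTakeGroup sort_index end_window (PySem.List.pyGetD x sort_index 0) rest).2
termination_by l => l.length
decreasing_by
  exact Nat.lt_succ_of_le (pvTakeGroup_snd_len _ _ _ _)

def group_reads_by_ends_alt (read_info_list : List (List Int)) (sort_index : Int) (end_window : Int) : List (List (List Int)) :=
  pvBuildGroups sort_index end_window
    (PySem.List.sorted read_info_list (fun x => PySem.List.pyGetD x sort_index 0) false)

-- ===== PRECONDITION & SPEC =====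
-- Pre_: Python A raises IndexError when some read's list does not admit sort_index; exactly those inputs are excluded.
def Pre_group_reads_by_ends (read_info_list : List (List Int)) (sort_index : Int) (end_window : Int) : Prop :=
  ∀ r ∈ read_info_list, PySem.Raise.InRange r.length sort_index
instance (read_info_list : List (List Int)) (sort_index : Int) (end_window : Int) : Decidable (Pre_group_reads_by_ends read_info_list sort_index end_window) := by unfold Pre_group_reads_by_ends; infer_instance

def pvWitness_group_reads_by_ends : List (List Int) × Int × Int := ([[1, 2], [10, 3], [2, 4]], 0, 3)

def Spec_group_reads_by_ends (read_info_list : List (List Int)) (sort_index : Int) (end_window : Int) (out : List (List (List Int))) : Prop := out = group_reads_by_ends_alt read_info_list sort_index end_window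
instance (read_info_list : List (List Int)) (sort_index : Int) (end_window : Int) (out : List (List (List Int))) : Decidable (Spec_group_reads_by_ends read_info_list sort_index end_window out) := by unfold Spec_group_reads_by_ends; infer_instance

-- ===== CLAIM (what is proved, stated in full; the proofs are below) =====
def Claim_equal_group_reads_by_ends : Prop := ∀ (read_info_list : List (List Int)) (sort_index : Int) (end_window : Int), Dom_group_reads_by_ends read_info_list sort_index end_window → Pre_group_reads_by_ends read_info_list sort_index end_window → Spec_group_reads_by_ends read_info_list sort_index end_window (group_reads_by_ends read_info_list sort_index end_window)

-- ===== LEMMAS AND PROOFS =====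
-- A's loop body and flush, named to state the invariant
def pvStepA (sort_index end_window : Int)
    (st : List (List (List Int)) × List (List Int) × Int) (iso_info : List Int) :
    List (List (List Int)) × List (List Int) × Int :=
  let edge := PySem.List.pyGetD iso_info sort_index 0
  if edge - st.2.2 ≤ end_window then
    (st.1, st.2.1 ++ [iso_info], edge)
  else
    ((if st.2.1.length > 0 then st.1 ++ [st.2.1] else st.1), [iso_info], edge)

def pvFinishA (st : List (List (List Int)) × List (List Int) × Int) : List (List (List Int)) :=
  if st.2.1.length > 0 then st.1 ++ [st.2.1] else st.1

-- loop invariant: A's fold started with a non-empty current group equals emitted groups ++ greedy continuation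
theorem pvFold_eq_build (sort_index end_window : Int) (l : List (List Int))
    (gs : List (List (List Int))) (g : List (List Int)) (e : Int) (hg : g ≠ []) :
    pvFinishA (l.foldl (pvStepA sort_index end_window) (gs, g, e)) =
      gs ++ ((g ++ (pvTakeGroup sort_index end_window e l).1) ::
        pvBuildGroups sort_index end_window (pvTakeGroup sort_index end_window e l).2) := by
  induction l generalizing gs g e with
  | nil => simp [pvFinishA, pvTakeGroup, pvBuildGroups, List.length_pos_iff, hg]
  | cons y ys ih =>
    rw [List.foldl_cons]
    by_cases h : PySem.List.pyGetD y sort_index 0 - e ≤ end_window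
    · rw [show pvStepA sort_index end_window (gs, g, e) y
          = (gs, g ++ [y], PySem.List.pyGetD y sort_index 0) from by simp [pvStepA, h]]
      rw [ih gs (g ++ [y]) _ (by simp)]
      simp [pvTakeGroup, h]
    · rw [show pvStepA sort_index end_window (gs, g, e) y
          = (gs ++ [g], [y], PySem.List.pyGetD y sort_index 0) from by
        simp [pvStepA, h, List.length_pos_iff, hg]]
      rw [ih (gs ++ [g]) [y] _ (by simp)]
      simp [pvTakeGroup, h, pvBuildGroups]

-- ===== VERDICT (by name: the statement is the Claim_ definition above) =====
theorem group_reads_by_ends_spec : Claim_equal_group_reads_by_ends := by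
  intro read_info_list sort_index end_window _ _
  unfold Spec_group_reads_by_ends group_reads_by_ends group_reads_by_ends_alt
  cases hs : PySem.List.sorted read_info_list (fun x => PySem.List.pyGetD x sort_index 0) false with
  | nil => simp [pvBuildGroups]
  | cons x t =>
    show pvFinishA ((x :: t).foldl (pvStepA sort_index end_window) ([], [], 0)) = _
    have hfirst : pvStepA sort_index end_window ([], [], 0) x
        = ([], [x], PySem.List.pyGetD x sort_index 0) := by
      simp only [pvStepA]
      split <;> simp
    rw [List.foldl_cons, hfirst,
      pvFold_eq_build sort_index end_window t [] [x] _ (by simp)]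
    simp [pvBuildGroups]
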